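-- pv_equiv track=rewrite | github.com/jpmitmpr/Assignment_5 | performance_lab.py | simulate_list_resizing
-- ===== SOURCE A (Python) =====
-- def simulate_list_resizing(operations):
--     capacity = 1
--     size = 0
--     resizes = 0
--     for _ in range(operations):
--         if size == capacity:
--             capacity *= 2
--             resizes += 1
--         size += 1
--     return {"final_capacity": capacity, "resizes": resizes}
-- ===== SOURCE B (Python) =====
-- def simulate_list_resizing(operations):
--     if operations >= 1:
--         resizes = (operations - 1).bit_length()
--     else:
--         resizes = 0
--     return {"final_capacity": 2 ** resizes, "resizes": resizes}
-- ===== Notes on version B (the rewrite author's own statement) =====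
-- stated objective: faster
-- what changed: Replaced the linear append-simulation loop with a closed form: the resize count is the bit length of the predecessor of the operation count (zero when no operations run) and the final capacity is two raised to that count.
import Mathlib
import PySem

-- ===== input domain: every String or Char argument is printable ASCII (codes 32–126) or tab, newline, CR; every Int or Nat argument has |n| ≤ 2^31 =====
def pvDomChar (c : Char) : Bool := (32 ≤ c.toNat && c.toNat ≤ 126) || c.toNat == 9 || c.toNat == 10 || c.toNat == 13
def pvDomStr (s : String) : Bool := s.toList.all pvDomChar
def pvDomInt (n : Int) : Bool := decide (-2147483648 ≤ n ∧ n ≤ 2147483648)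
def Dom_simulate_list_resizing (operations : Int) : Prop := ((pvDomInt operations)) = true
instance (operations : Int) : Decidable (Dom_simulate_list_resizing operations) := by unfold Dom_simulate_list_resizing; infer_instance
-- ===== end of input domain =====

-- B replaces A's O(n) append-simulation loop with a closed form via bit_length; proved equal on all inputs.

-- ===== PORT A =====
-- the loop body of A: one append operation on the state (capacity, size, resizes)
def pvStep (st : Int × Int × Int) : Int × Int × Int :=
  if st.2.1 = st.1 then (st.1 * 2, st.2.1 + 1, st.2.2 + 1)
  else (st.1, st.2.1 + 1, st.2.2)

def simulate_list_resizing (operations : Int) : List (String × Int) :=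
  let st := (PySem.List.pyRange 0 operations 1).foldl (fun s _ => pvStep s) (1, 0, 0)
  [("final_capacity", st.1), ("resizes", st.2.2)]

-- ===== PORT B =====
-- int.bit_length for nonnegative ints: number of binary digits
def pvBitLength : Nat → Nat
  | 0 => 0
  | (m+1) => pvBitLength ((m+1)/2) + 1

def simulate_list_resizing_alt (operations : Int) : List (String × Int) :=
  let resizes : Nat := if 1 ≤ operations then pvBitLength (operations - 1).toNat else 0
  [("final_capacity", (2:Int)^resizes), ("resizes", (resizes : Int))]

-- ===== PRECONDITION & SPEC =====
def Spec_simulate_list_resizing (operations : Int) (out : List (String × Int)) : Prop := out = simulate_list_resizing_alt operations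
instance (operations : Int) (out : List (String × Int)) : Decidable (Spec_simulate_list_resizing operations out) := by unfold Spec_simulate_list_resizing; infer_instance

-- ===== CLAIM (what is proved, stated in full; the proofs are below) =====
def Claim_equal_simulate_list_resizing : Prop := ∀ (operations : Int), Dom_simulate_list_resizing operations → Spec_simulate_list_resizing operations (simulate_list_resizing operations)

-- ===== LEMMAS AND PROOFS =====

theorem pvBitLength_zero : pvBitLength 0 = 0 := by rw [pvBitLength]

theorem pvBitLength_succ (m : Nat) : pvBitLength (m+1) = pvBitLength ((m+1)/2) + 1 := by
  rw [pvBitLength]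

-- upper bound: m < 2 ^ bit_length m
theorem pvBitLength_lt (m : Nat) : m < 2 ^ pvBitLength m := by
  induction m using Nat.strong_induction_on with
  | _ m ih =>
    match m with
    | 0 => rw [pvBitLength_zero]; norm_num
    | (k+1) =>
      rw [pvBitLength_succ]
      have h := ih ((k+1)/2) (by omega)
      rw [pow_succ]
      omega

-- lower bound for positive m: 2 ^ (bit_length m - 1) <= m, and bit_length m >= 1
theorem pvBitLength_ge (m : Nat) (hm : 1 ≤ m) : 2 ^ (pvBitLength m - 1) ≤ m ∧ 1 ≤ pvBitLength m := by
  induction m using Nat.strong_induction_on with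
  | _ m ih =>
    match m, hm with
    | (k+1), _ =>
      rw [pvBitLength_succ]
      refine ⟨?_, by omega⟩
      by_cases h0 : (k+1)/2 = 0
      · rw [h0, pvBitLength_zero]; simp
      · obtain ⟨h1, h2⟩ := ih ((k+1)/2) (by omega) (by omega)
        have he : pvBitLength ((k+1)/2) + 1 - 1 = (pvBitLength ((k+1)/2) - 1) + 1 := by omega
        rw [he, pow_succ]
        omega

-- characterization: 2^j <= m < 2^(j+1) → bit_length m = j+1
theorem pvBitLength_eq (m j : Nat) (h1 : 2^j ≤ m) (h2 : m < 2^(j+1)) : pvBitLength m = j + 1 := by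
  induction m using Nat.strong_induction_on generalizing j with
  | _ m ih =>
    have hm : 1 ≤ m := le_trans Nat.one_le_two_pow h1
    match m, hm with
    | (k+1), _ =>
      rw [pvBitLength_succ]
      match j with
      | 0 =>
        have hk : k = 0 := by
          have : k + 1 < 2 := by simpa using h2
          omega
        subst hk
        norm_num [pvBitLength_zero]
      | (j'+1) =>
        have ha : 2^j' ≤ (k+1)/2 := by rw [pow_succ] at h1; omega
        have hb : (k+1)/2 < 2^(j'+1) := by
          rw [pow_succ] at h2; rw [pow_succ]; omega
        rw [ih ((k+1)/2) (by omega) j' ha hb]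

-- the resize count after k appends
def pvR (k : Nat) : Nat := pvBitLength (k - 1)

theorem pvR_step (k : Nat) : pvR (k+1) = if k = 2 ^ pvR k then pvR k + 1 else pvR k := by
  unfold pvR
  simp only [Nat.add_sub_cancel]
  match k with
  | 0 => norm_num [pvBitLength_zero, pvBitLength_succ]
  | (k'+1) =>
    simp only [Nat.add_sub_cancel]
    split
    · next heq => exact pvBitLength_eq _ _ (le_of_eq heq.symm) (by rw [pow_succ]; omega)
    · next hne =>
      have hub := pvBitLength_lt k'
      have hlt : k' + 1 < 2 ^ pvBitLength k' := by omega
      match k' with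
      | 0 => rw [pvBitLength_zero] at hlt; omega
      | (m+1) =>
        obtain ⟨hge, hpos⟩ := pvBitLength_ge (m+1) (by omega)
        have he : pvBitLength (m+1) = (pvBitLength (m+1) - 1) + 1 := by omega
        rw [he]
        apply pvBitLength_eq
        · omega
        · rw [← he]; omega

-- loop over a list ignoring elements = function iteration
theorem foldl_const {α β : Type} (g : α → α) (l : List β) (s : α) :
    l.foldl (fun a _ => g a) s = g^[l.length] s := by
  induction l generalizing s with
  | nil => rfl
  | cons x xs ih => simp [List.foldl_cons, ih, Function.iterate_succ_apply]

-- the loop invariant of A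
theorem pvStep_iterate (k : Nat) :
    pvStep^[k] (1, 0, 0) = (((2:Int) ^ pvR k), (k : Int), ((pvR k : Nat) : Int)) := by
  induction k with
  | zero => simp [pvR, pvBitLength_zero]
  | succ k ih =>
    rw [Function.iterate_succ_apply', ih, pvR_step]
    by_cases h : k = 2 ^ pvR k
    · have hc : ((k : Int)) = (2:Int) ^ pvR k := by exact_mod_cast h
      simp only [if_pos h, pvStep, hc, if_true, Prod.mk.injEq]
      refine ⟨(pow_succ _ _).symm, ?_, by push_cast; ring⟩
      push_cast
      rw [hc]
    · have hc : ¬((k : Int) = (2:Int) ^ pvR k) := fun hh => h (by exact_mod_cast hh)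
      simp only [if_neg h, pvStep, if_neg hc, Prod.mk.injEq]
      exact ⟨trivial, by push_cast; ring, trivial⟩

-- ===== VERDICT (by name: the statement is the Claim_ definition above) =====
theorem simulate_list_resizing_spec : Claim_equal_simulate_list_resizing := by
  intro n _
  unfold Spec_simulate_list_resizing simulate_list_resizing simulate_list_resizing_alt
  rw [foldl_const, PySem.List.length_pyRange_one, pvStep_iterate]
  simp only [Int.sub_zero]
  by_cases h1 : 1 ≤ n
  · have he : (n - 1).toNat = n.toNat - 1 := by omega
    simp [h1, he, pvR]
  · have h0 : n.toNat = 0 := by omega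
    simp [h1, h0, pvR, pvBitLength_zero]
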